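-- pv_equiv track=rewrite | github.com/LeoCanta42/FCE_bot | module/markups.py | extract_cities
-- ===== SOURCE A (Python) =====
-- def extract_cities(stops):
--     cities = []
--     for stop in stops:
--         stop=stop.replace('(','').replace(')','')
--         stop_words = stop.split()
--         city = ""
--         if len(stop_words) == 1:
--             city = stop_words[0]
--         else:
--             old_count=0
--             for i in range(len(stop_words)):
--                 if len(stop_words)==1: #se solo una parola
--                     city = " ".join(stop_words)
--                     break
--                 elif " ".join(stop_words[:i+1]) in cities:
--                     break # abbiamo già trovato questa città in un'altra fermata
--                 else:
--                     cur_count=0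
--                     for s in stops:
--                         s_words=s.split()
--                         if i<len(s_words) and " ".join(stop_words[:i+1]) == " ".join(s_words[:i+1]):
--                             cur_count+=1 #di quante e' sotto stringa
--                     if cur_count>old_count:
--                         old_count=cur_count
--                     elif cur_count<old_count: #se prima maggiore e poi minore allora diminuendo vuol dire che non trovo l'associazione massima
--                         city = " ".join(stop_words[:i])
--                         break
--                     elif cur_count==old_count: #se uguale allora e' una fermata unica
--                         city = " ".join(stop_words)
--                         break
--         if city:
--             cities.append(city)
--     return cities
-- ===== SOURCE B (Python) =====
-- def extract_cities(stops):
--     # A stop's city is decided by its first one or two words alone: prefix-match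
--     # counts are non-increasing in prefix length (split words contain no spaces),
--     # so the decision always falls at the first or second word.  Count first
--     # words and first word-pairs once up front; no per-stop rescan of all stops.
--     one = {}
--     two = {}
--     for s in stops:
--         w = s.split()
--         if w:
--             one[w[0]] = one.get(w[0], 0) + 1
--         if len(w) > 1:
--             k = w[0] + " " + w[1]
--             two[k] = two.get(k, 0) + 1
--     cities = []
--     for stop in stops:
--         w = stop.replace('(', '').replace(')', '').split()
--         if not w:
--             continue
--         if len(w) == 1:
--             city = w[0]
--         elif w[0] in cities:
--             continue
--         elif one.get(w[0], 0) == 0: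
--             city = " ".join(w)
--         elif w[0] + " " + w[1] in cities:
--             continue
--         elif two.get(w[0] + " " + w[1], 0) < one[w[0]]:
--             city = w[0]
--         else:
--             city = " ".join(w)
--         cities.append(city)
--     return cities
-- ===== Notes on version B (the rewrite author's own statement) =====
-- stated objective: alternative
-- what changed: B replaces A's grow-the-prefix loop with per-prefix rescans of all stops by a two-level closed-form decision: since prefix-match counts are non-increasing in prefix length (split words contain no spaces), A always decides at the first or second word, so B precomputes one counter of first words and one of first word-pairs and decides each stop by dictionary lookups.
import Mathlib
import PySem

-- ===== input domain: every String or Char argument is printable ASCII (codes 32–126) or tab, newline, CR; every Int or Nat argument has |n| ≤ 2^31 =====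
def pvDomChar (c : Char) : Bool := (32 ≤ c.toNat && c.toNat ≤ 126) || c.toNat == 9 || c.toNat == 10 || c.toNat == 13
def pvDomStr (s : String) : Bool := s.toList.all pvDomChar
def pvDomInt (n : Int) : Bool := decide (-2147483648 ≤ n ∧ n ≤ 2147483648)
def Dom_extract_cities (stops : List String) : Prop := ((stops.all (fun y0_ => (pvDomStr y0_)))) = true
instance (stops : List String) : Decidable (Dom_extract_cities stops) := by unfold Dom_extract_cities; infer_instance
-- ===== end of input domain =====

-- B decides each stop by its first one or two words with two precomputed counters
-- (A's prefix loop always stops there), removing A's per-prefix rescan of all stops (objective: alternative).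
set_option maxHeartbeats 1000000


-- ===== PORT A =====
-- body of A's inner 'for s in stops: … cur_count += 1' scan (s_words = split₀ s is inlined)
def pvScanStep (stop_words : List String) (i : Int) (cur_count : Int) (s : String) : Int :=
  if i < PySem.List.len (PySem.Str.split₀ s) ∧
      PySem.Str.join " " (PySem.List.slice stop_words none (some (i + 1)))
        = PySem.Str.join " " (PySem.List.slice (PySem.Str.split₀ s) none (some (i + 1))) then
    cur_count + 1
  else cur_count

def pvCurCount (stops : List String) (stop_words : List String) (i : Int) : Int :=
  stops.foldl (pvScanStep stop_words i) 0

-- A's 'for i in range(len(stop_words))' loop with its breaks; returns the final `city`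
def pvLoopA (stops cities stop_words : List String) : List Int → Int → String
  | [], _ => ""
  | i :: rest, old_count =>
    if PySem.List.len stop_words = 1 then PySem.Str.join " " stop_words
    else if PySem.Str.join " " (PySem.List.slice stop_words none (some (i + 1))) ∈ cities then ""
    else
      if pvCurCount stops stop_words i > old_count then
        pvLoopA stops cities stop_words rest (pvCurCount stops stop_words i)
      else if pvCurCount stops stop_words i < old_count then
        PySem.Str.join " " (PySem.List.slice stop_words none (some i))
      else PySem.Str.join " " stop_words

-- A's per-stop `city` (stop_words = the cleaned, split stop)
def pvCityA (stops cities stop_words : List String) : String :=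
  if PySem.List.len stop_words = 1 then PySem.List.pyGetD stop_words 0 ""  -- stop_words[0], guarded by len = 1
  else pvLoopA stops cities stop_words (PySem.List.pyRange 0 (PySem.List.len stop_words) 1) 0

-- body of A's outer 'for stop in stops' loop
def pvStepA (stops cities : List String) (stop : String) : List String :=
  if pvCityA stops cities
      (PySem.Str.split₀ (PySem.Str.replace (PySem.Str.replace stop "(" "") ")" "")) ≠ "" then
    cities ++ [pvCityA stops cities
      (PySem.Str.split₀ (PySem.Str.replace (PySem.Str.replace stop "(" "") ")" ""))]
  else cities

def extract_cities (stops : List String) : List String :=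
  stops.foldl (pvStepA stops) []

-- ===== PORT B =====
-- B's first loop body: count first words (one) and first word-pairs (two)
def pvCntStep (acc : PySem.Dict String Int × PySem.Dict String Int) (s : String) :
    PySem.Dict String Int × PySem.Dict String Int :=
  let w := PySem.Str.split₀ s
  ((if w ≠ [] then acc.1.insert (w.headD "") (acc.1.getD (w.headD "") 0 + 1) else acc.1),
   (if 1 < w.length then
      acc.2.insert (w.headD "" ++ " " ++ PySem.List.pyGetD w 1 "")
        (acc.2.getD (w.headD "" ++ " " ++ PySem.List.pyGetD w 1 "") 0 + 1)
    else acc.2))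

-- B's per-stop decision: none = `continue`, some c = `cities.append(c)`
def pvCityB (one two : PySem.Dict String Int) (cities : List String) (w : List String) :
    Option String :=
  if w = [] then none
  else if w.length = 1 then some (w.headD "")
  else if w.headD "" ∈ cities then none
  else if one.getD (w.headD "") 0 = 0 then some (PySem.Str.join " " w)
  else if (w.headD "" ++ " " ++ PySem.List.pyGetD w 1 "") ∈ cities then none
  else if two.getD (w.headD "" ++ " " ++ PySem.List.pyGetD w 1 "") 0 < one.getD (w.headD "") 0 then
    some (w.headD "")
  else some (PySem.Str.join " " w)

-- body of B's second 'for stop in stops' loop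
def pvStepB (one two : PySem.Dict String Int) (cities : List String) (stop : String) :
    List String :=
  match pvCityB one two cities
      (PySem.Str.split₀ (PySem.Str.replace (PySem.Str.replace stop "(" "") ")" "")) with
  | none => cities
  | some c => cities ++ [c]

def extract_cities_alt (stops : List String) : List String :=
  stops.foldl
    (pvStepB (stops.foldl pvCntStep (PySem.Dict.empty, PySem.Dict.empty)).1
             (stops.foldl pvCntStep (PySem.Dict.empty, PySem.Dict.empty)).2) []

-- ===== PRECONDITION & SPEC =====
def Spec_extract_cities (stops : List String) (out : List String) : Prop := out = extract_cities_alt stops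
instance (stops : List String) (out : List String) : Decidable (Spec_extract_cities stops out) := by unfold Spec_extract_cities; infer_instance

-- ===== CLAIM (what is proved, stated in full; the proofs are below) =====
def Claim_equal_extract_cities : Prop := ∀ (stops : List String), Dom_extract_cities stops → Spec_extract_cities stops (extract_cities stops)

-- ===== LEMMAS AND PROOFS =====

-- every word produced by Python's str.split() is nonempty and contains no whitespace
lemma pv_split0_go_facts (s : List Char) (cur : List Char) (acc : List (List Char))
    (hacc : ∀ w ∈ acc, w ≠ [] ∧ ∀ c ∈ w, PySem.Chars.isspace c = false)
    (hcur : ∀ c ∈ cur, PySem.Chars.isspace c = false) :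
    ∀ w ∈ PySem.Chars.split₀.go s cur acc, w ≠ [] ∧ ∀ c ∈ w, PySem.Chars.isspace c = false := by
  induction s generalizing cur acc with
  | nil =>
    intro w hw
    simp only [PySem.Chars.split₀.go] at hw
    split_ifs at hw with h
    · exact hacc w (by simpa using hw)
    · simp only [List.mem_reverse, List.mem_cons] at hw
      rcases hw with hw | hw
      · subst hw
        refine ⟨by simpa [List.isEmpty_iff] using h, fun c hc => hcur c (by simpa using hc)⟩
      · exact hacc w hw
  | cons c rest ih =>
    intro w hw
    simp only [PySem.Chars.split₀.go] at hw
    split_ifs at hw with h1 h2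
    · exact ih [] acc hacc (by simp) w hw
    · refine ih [] _ ?_ (by simp) w hw
      intro v hv
      simp only [List.mem_cons] at hv
      rcases hv with hv | hv
      · subst hv
        exact ⟨by simpa [List.isEmpty_iff] using h2, fun d hd => hcur d (by simpa using hd)⟩
      · exact hacc v hv
    · refine ih (c :: cur) acc hacc ?_ w hw
      intro d hd
      simp only [List.mem_cons] at hd
      rcases hd with hd | hd
      · subst hd; simpa using h1
      · exact hcur d hd

lemma pv_split0_facts (s : String) :
    ∀ w ∈ PySem.Str.split₀ s, w ≠ "" ∧ (' ' : Char) ∉ w.toList := by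
  intro w hw
  have h1 : w.toList ∈ PySem.Chars.split₀ s.toList := by
    rw [← PySem.Str.split₀_map_toList]
    exact List.mem_map_of_mem hw
  have h2 := pv_split0_go_facts s.toList [] [] (by simp) (by simp) w.toList
    (by simpa [PySem.Chars.split₀] using h1)
  refine ⟨fun hc => h2.1 (by simp [hc]), fun hc => ?_⟩
  have := h2.2 ' ' hc
  simp [PySem.Chars.isspace] at this

-- unique decomposition at a space when neither left part contains one
lemma pv_space_split (a : List Char) (b : List Char) (ha : (' ' : Char) ∉ a) :
    ∀ (c d : List Char), (' ' : Char) ∉ c → a ++ ' ' :: b = c ++ ' ' :: d → a = c ∧ b = d := by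
  induction a with
  | nil =>
    intro c d hc h
    cases c with
    | nil => simpa using h
    | cons x xs =>
      simp at h
      exact (hc (by simp [← h.1])).elim
  | cons x xs ih =>
    intro c d hc h
    cases c with
    | nil =>
      simp at h
      exact (ha (by simp [h.1])).elim
    | cons y ys =>
      simp only [List.cons_append, List.cons.injEq] at h
      have := ih (fun hm => ha (List.mem_cons_of_mem _ hm)) ys d
        (fun hm => hc (List.mem_cons_of_mem _ hm)) h.2
      exact ⟨by simp [h.1, this.1], this.2⟩

lemma pv_join_one (a : String) : PySem.Str.join " " [a] = a := by
  apply String.ext; simp [PySem.Str.toList_join, PySem.Chars.join, List.intercalate]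

lemma pv_join_two (a b : String) : PySem.Str.join " " [a, b] = a ++ " " ++ b := by
  apply String.ext; simp [PySem.Str.toList_join, PySem.Chars.join, List.intercalate]

lemma pv_join_ne_empty (a : String) (rest : List String) (h2 : a ≠ "") :
    PySem.Str.join " " (a :: rest) ≠ "" := by
  intro hc
  have h3 := congrArg String.toList hc
  simp [PySem.Str.toList_join, PySem.Chars.join, List.intercalate] at h3
  have h4 := h3 a.toList (by cases rest <;> simp)
  exact h2 (by apply String.ext; simp [h4])

-- A's counting fold, started at c, is c plus the fold started at 0
lemma pv_scan_shift (W : List String) (i : Int) (l : List String) (c : Int) :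
    l.foldl (pvScanStep W i) c = c + l.foldl (pvScanStep W i) 0 := by
  induction l generalizing c with
  | nil => simp
  | cons s rest ih =>
    rw [List.foldl_cons, ih]
    conv_rhs => rw [List.foldl_cons, ih]
    have h : pvScanStep W i c s = c + pvScanStep W i 0 s := by
      unfold pvScanStep; split_ifs <;> omega
    omega

-- A's inner scan is a countP over stops
lemma pv_curCount_eq_countP (stops W : List String) (i : Int) :
    pvCurCount stops W i
      = (stops.countP (fun s => decide (i < PySem.List.len (PySem.Str.split₀ s) ∧
          PySem.Str.join " " (PySem.List.slice W none (some (i + 1)))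
            = PySem.Str.join " " (PySem.List.slice (PySem.Str.split₀ s) none (some (i + 1))))) : Int) := by
  induction stops with
  | nil => simp [pvCurCount]
  | cons s rest ih =>
    unfold pvCurCount at ih ⊢
    rw [List.foldl_cons, pv_scan_shift, ih, List.countP_cons]
    unfold pvScanStep
    rcases Decidable.em (i < PySem.List.len (PySem.Str.split₀ s) ∧
        PySem.Str.join " " (PySem.List.slice W none (some (i + 1)))
          = PySem.Str.join " " (PySem.List.slice (PySem.Str.split₀ s) none (some (i + 1)))) with h | h
    · rw [if_pos h, if_pos (by simpa using h)]
      push_cast; omega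
    · rw [if_neg h, if_neg (by simpa using h)]
      push_cast; omega

-- B's counters, read back
lemma pv_cnt_getD (l : List String) (d1 d2 : PySem.Dict String Int) (k : String) :
    ((l.foldl pvCntStep (d1, d2)).1.getD k 0
        = d1.getD k 0 + (l.countP (fun s => decide (PySem.Str.split₀ s ≠ [] ∧ (PySem.Str.split₀ s).headD "" = k)) : Int))
    ∧ ((l.foldl pvCntStep (d1, d2)).2.getD k 0
        = d2.getD k 0 + (l.countP (fun s => decide (1 < (PySem.Str.split₀ s).length ∧
            (PySem.Str.split₀ s).headD "" ++ " " ++ PySem.List.pyGetD (PySem.Str.split₀ s) 1 "" = k)) : Int)) := by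
  induction l generalizing d1 d2 with
  | nil => simp
  | cons s rest ih =>
    rw [List.foldl_cons]
    have hs : pvCntStep (d1, d2) s
        = ((if PySem.Str.split₀ s ≠ [] then
              d1.insert ((PySem.Str.split₀ s).headD "")
                (d1.getD ((PySem.Str.split₀ s).headD "") 0 + 1)
            else d1),
           (if 1 < (PySem.Str.split₀ s).length then
              d2.insert ((PySem.Str.split₀ s).headD "" ++ " " ++ PySem.List.pyGetD (PySem.Str.split₀ s) 1 "")
                (d2.getD ((PySem.Str.split₀ s).headD "" ++ " " ++ PySem.List.pyGetD (PySem.Str.split₀ s) 1 "") 0 + 1)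
            else d2)) := rfl
    rw [hs]
    constructor
    · rw [(ih _ _).1, List.countP_cons]
      by_cases h1 : PySem.Str.split₀ s ≠ []
      · rw [if_pos h1, PySem.Dict.getD_insert]
        by_cases h2 : k = (PySem.Str.split₀ s).headD ""
        · rw [if_pos h2, if_pos (decide_eq_true ⟨h1, h2.symm⟩), h2]; push_cast; omega
        · rw [if_neg h2,
            if_neg (by simp only [decide_eq_true_eq]; rintro ⟨_, hEq⟩; exact h2 hEq.symm)]
          push_cast; omega
      · rw [if_neg h1,
          if_neg (by simp only [decide_eq_true_eq]; rintro ⟨hne, _⟩; exact h1 hne)]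
        push_cast; omega
    · rw [(ih _ _).2, List.countP_cons]
      by_cases h1 : 1 < (PySem.Str.split₀ s).length
      · rw [if_pos h1, PySem.Dict.getD_insert]
        by_cases h2 : k = (PySem.Str.split₀ s).headD "" ++ " " ++ PySem.List.pyGetD (PySem.Str.split₀ s) 1 ""
        · rw [if_pos h2, if_pos (decide_eq_true ⟨h1, h2.symm⟩), h2]; push_cast; omega
        · rw [if_neg h2,
            if_neg (by simp only [decide_eq_true_eq]; rintro ⟨_, hEq⟩; exact h2 hEq.symm)]
          push_cast; omega
      · rw [if_neg h1,
          if_neg (by simp only [decide_eq_true_eq]; rintro ⟨hne, _⟩; exact h1 hne)]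
        push_cast; omega

-- slices of the two-word prefix
lemma pv_slice_one (w0 w1 : String) (rest : List String) :
    PySem.List.slice (w0 :: w1 :: rest) none (some ((0 : Int) + 1)) = [w0] := by
  rw [PySem.List.slice_to _ (by norm_num)]; rfl

lemma pv_slice_one' (w0 w1 : String) (rest : List String) :
    PySem.List.slice (w0 :: w1 :: rest) none (some (1 : Int)) = [w0] := by
  rw [PySem.List.slice_to _ (by norm_num)]; rfl

lemma pv_slice_two (w0 w1 : String) (rest : List String) :
    PySem.List.slice (w0 :: w1 :: rest) none (some ((1 : Int) + 1)) = [w0, w1] := by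
  rw [PySem.List.slice_to _ (by norm_num)]; rfl

-- B's first-word counter reads back as A's i = 0 scan
lemma pv_one_eq (stops : List String) (w0 w1 : String) (rest : List String) :
    (stops.foldl pvCntStep (PySem.Dict.empty, PySem.Dict.empty)).1.getD w0 0
      = pvCurCount stops (w0 :: w1 :: rest) 0 := by
  rw [(pv_cnt_getD stops PySem.Dict.empty PySem.Dict.empty w0).1, pv_curCount_eq_countP]
  rw [PySem.Dict.getD_empty, zero_add]
  congr 1
  apply List.countP_congr
  intro s _
  simp only [decide_eq_true_eq, pv_slice_one, pv_join_one]
  cases hsw : PySem.Str.split₀ s with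
  | nil => simp [PySem.List.len]
  | cons s0 t =>
    have h1s : PySem.List.slice (s0 :: t) none (some (1 : Int)) = [s0] := by
      rw [PySem.List.slice_to _ (by norm_num)]; rfl
    simp [PySem.List.len, h1s, pv_join_one, eq_comm]

-- B's word-pair counter reads back as A's i = 1 scan
lemma pv_two_eq (stops : List String) (w0 w1 : String) (rest : List String) :
    (stops.foldl pvCntStep (PySem.Dict.empty, PySem.Dict.empty)).2.getD (w0 ++ " " ++ w1) 0
      = pvCurCount stops (w0 :: w1 :: rest) 1 := by
  rw [(pv_cnt_getD stops PySem.Dict.empty PySem.Dict.empty (w0 ++ " " ++ w1)).2,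
    pv_curCount_eq_countP]
  rw [PySem.Dict.getD_empty, zero_add]
  congr 1
  apply List.countP_congr
  intro s _
  simp only [decide_eq_true_eq, pv_slice_two, pv_join_two]
  cases hsw : PySem.Str.split₀ s with
  | nil => simp [PySem.List.len]
  | cons s0 t =>
    cases t with
    | nil => simp [PySem.List.len]
    | cons s1 t2 =>
      have hsl : PySem.List.slice (s0 :: s1 :: t2) none (some ((1 : Int) + 1)) = [s0, s1] := by
        rw [PySem.List.slice_to _ (by norm_num)]; rfl
      have hg : PySem.List.pyGetD (s0 :: s1 :: t2) 1 "" = s1 := by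
        simp [PySem.List.pyGetD, PySem.List.pyGet?, PySem.List.pyIdx?]
      simp only [hsl, pv_join_two, hg, List.headD_cons, PySem.List.len, List.length_cons]
      constructor
      · rintro ⟨h1, h2⟩
        exact ⟨by omega, h2.symm⟩
      · rintro ⟨h1, h2⟩
        exact ⟨by omega, h2.symm⟩

-- the two-word match count never exceeds the one-word match count (split words contain no spaces)
lemma pv_mono (stops : List String) (w0 w1 : String) (rest : List String)
    (hw0s : (' ' : Char) ∉ w0.toList) :
    pvCurCount stops (w0 :: w1 :: rest) 1 ≤ pvCurCount stops (w0 :: w1 :: rest) 0 := by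
  rw [pv_curCount_eq_countP, pv_curCount_eq_countP]
  have h := List.countP_mono_left (l := stops)
    (p := fun s => decide ((1 : Int) < PySem.List.len (PySem.Str.split₀ s) ∧
      PySem.Str.join " " (PySem.List.slice (w0 :: w1 :: rest) none (some (1 + 1)))
        = PySem.Str.join " " (PySem.List.slice (PySem.Str.split₀ s) none (some (1 + 1)))))
    (q := fun s => decide ((0 : Int) < PySem.List.len (PySem.Str.split₀ s) ∧
      PySem.Str.join " " (PySem.List.slice (w0 :: w1 :: rest) none (some (0 + 1)))
        = PySem.Str.join " " (PySem.List.slice (PySem.Str.split₀ s) none (some (0 + 1)))))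
    ?_
  · exact_mod_cast h
  · intro s _
    simp only [decide_eq_true_eq]
    rintro ⟨h1, h2⟩
    cases hsw : PySem.Str.split₀ s with
    | nil => rw [hsw] at h1; simp [PySem.List.len] at h1
    | cons s0 t =>
      cases t with
      | nil => rw [hsw] at h1; simp [PySem.List.len] at h1
      | cons s1 t2 =>
        rw [hsw, pv_slice_two] at h2
        have hs2 : PySem.List.slice (s0 :: s1 :: t2) none (some ((1 : Int) + 1)) = [s0, s1] := by
          rw [PySem.List.slice_to _ (by norm_num)]; rfl
        rw [hs2, pv_join_two, pv_join_two] at h2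
        have htl := congrArg String.toList h2
        simp at htl
        have hs0 : (' ' : Char) ∉ s0.toList :=
          (pv_split0_facts s s0 (by rw [hsw]; simp)).2
        have hsp := pv_space_split w0.toList w1.toList hw0s s0.toList s1.toList hs0 htl
        have hw0s0 : w0 = s0 := by apply String.ext; exact hsp.1
        refine ⟨by simp only [PySem.List.len, List.length_cons]; omega, ?_⟩
        rw [pv_slice_one]
        have hs1 : PySem.List.slice (s0 :: s1 :: t2) none (some ((0 : Int) + 1)) = [s0] := by
          rw [PySem.List.slice_to _ (by norm_num)]; rfl
        rw [hs1, pv_join_one, pv_join_one, hw0s0]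

lemma pv_c0_nonneg (stops W : List String) : 0 ≤ pvCurCount stops W 0 := by
  rw [pv_curCount_eq_countP]; positivity

-- per-stop agreement: B's Option decision is exactly A's `city` (none ↔ "")
lemma pv_city_eq (stops cities W : List String)
    (hfacts : ∀ w ∈ W, w ≠ "" ∧ (' ' : Char) ∉ w.toList) :
    pvCityB (stops.foldl pvCntStep (PySem.Dict.empty, PySem.Dict.empty)).1
        (stops.foldl pvCntStep (PySem.Dict.empty, PySem.Dict.empty)).2 cities W
      = if pvCityA stops cities W = "" then none else some (pvCityA stops cities W) := by
  cases W with
  | nil =>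
    simp [pvCityA, pvCityB, pvLoopA, PySem.List.len, PySem.List.pyRange]
  | cons w0 W1 =>
    have hw0 : w0 ≠ "" := (hfacts w0 (by simp)).1
    cases W1 with
    | nil =>
      have hA : pvCityA stops cities [w0] = w0 := by
        simp [pvCityA, PySem.List.len, PySem.List.pyGetD, PySem.List.pyGet?, PySem.List.pyIdx?]
      simp [pvCityB, hA, hw0]
    | cons w1 rest =>
      have hw0s : (' ' : Char) ∉ w0.toList := (hfacts w0 (by simp)).2
      have hlen1 : ¬ (PySem.List.len (w0 :: w1 :: rest) = 1) := by
        simp [PySem.List.len]; omega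
      have h0lt : (0 : Int) < PySem.List.len (w0 :: w1 :: rest) := by
        simp [PySem.List.len]; omega
      have hrange : PySem.List.pyRange 0 (PySem.List.len (w0 :: w1 :: rest)) 1
          = 0 :: 1 :: PySem.List.pyRange 2 (PySem.List.len (w0 :: w1 :: rest)) 1 := by
        rw [PySem.List.pyRange_one_cons h0lt,
          PySem.List.pyRange_one_cons (by simp only [PySem.List.len, List.length_cons]; omega)]
        norm_num
      have hA : pvCityA stops cities (w0 :: w1 :: rest)
          = pvLoopA stops cities (w0 :: w1 :: rest)
              (0 :: 1 :: PySem.List.pyRange 2 (PySem.List.len (w0 :: w1 :: rest)) 1) 0 := by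
        rw [pvCityA, if_neg hlen1, hrange]
      have hg1 : PySem.List.pyGetD (w0 :: w1 :: rest) 1 "" = w1 := by
        simp [PySem.List.pyGetD, PySem.List.pyGet?, PySem.List.pyIdx?]
      have hone := pv_one_eq stops w0 w1 rest
      have htwo := pv_two_eq stops w0 w1 rest
      have hmono := pv_mono stops w0 w1 rest hw0s
      have hnn := pv_c0_nonneg stops (w0 :: w1 :: rest)
      set c0 := pvCurCount stops (w0 :: w1 :: rest) 0 with hc0def
      set c1 := pvCurCount stops (w0 :: w1 :: rest) 1 with hc1def
      have hAval : pvCityA stops cities (w0 :: w1 :: rest)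
          = (if w0 ∈ cities then ""
             else if c0 > 0 then
               (if w0 ++ " " ++ w1 ∈ cities then ""
                else if c1 < c0 then w0 else PySem.Str.join " " (w0 :: w1 :: rest))
             else PySem.Str.join " " (w0 :: w1 :: rest)) := by
        rw [hA, pvLoopA, if_neg hlen1, pv_slice_one, pv_join_one]
        by_cases hm0 : w0 ∈ cities
        · rw [if_pos hm0, if_pos hm0]
        · rw [if_neg hm0, if_neg hm0]
          by_cases hz : c0 > 0
          · rw [if_pos hz, if_pos hz]
            rw [pvLoopA, if_neg hlen1, pv_slice_two, pv_join_two]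
            by_cases hm1 : w0 ++ " " ++ w1 ∈ cities
            · rw [if_pos hm1, if_pos hm1]
            · rw [if_neg hm1, if_neg hm1, if_neg (by omega : ¬ c1 > c0)]
              by_cases hlt : c1 < c0
              · rw [if_pos hlt, if_pos hlt, pv_slice_one', pv_join_one]
              · rw [if_neg hlt, if_neg hlt]
          · rw [if_neg hz, if_neg hz, if_neg (by omega : ¬ c0 < 0)]
      have hBval : pvCityB (stops.foldl pvCntStep (PySem.Dict.empty, PySem.Dict.empty)).1
            (stops.foldl pvCntStep (PySem.Dict.empty, PySem.Dict.empty)).2 cities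
            (w0 :: w1 :: rest)
          = (if w0 ∈ cities then none
             else if c0 = 0 then some (PySem.Str.join " " (w0 :: w1 :: rest))
             else if w0 ++ " " ++ w1 ∈ cities then none
             else if c1 < c0 then some w0
             else some (PySem.Str.join " " (w0 :: w1 :: rest))) := by
        rw [pvCityB, if_neg (by simp), if_neg (by simp)]
        simp only [List.headD_cons]
        rw [hg1, hone, htwo]
      rw [hAval, hBval]
      by_cases hm0 : w0 ∈ cities
      · rw [if_pos hm0, if_pos hm0, if_pos rfl]
      · rw [if_neg hm0, if_neg hm0]
        by_cases hz : c0 > 0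
        · rw [if_pos hz, if_neg (by omega : ¬ c0 = 0)]
          by_cases hm1 : w0 ++ " " ++ w1 ∈ cities
          · rw [if_pos hm1, if_pos hm1, if_pos rfl]
          · rw [if_neg hm1, if_neg hm1]
            by_cases hlt : c1 < c0
            · rw [if_pos hlt, if_pos hlt, if_neg hw0]
            · rw [if_neg hlt, if_neg hlt,
                if_neg (pv_join_ne_empty w0 (w1 :: rest) hw0)]
        · rw [if_neg hz, if_pos (by omega : c0 = 0),
            if_neg (pv_join_ne_empty w0 (w1 :: rest) hw0)]

-- A's outer-loop body equals B's
lemma pv_step_eq (stops cities : List String) (stop : String) :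
    pvStepA stops cities stop
      = pvStepB (stops.foldl pvCntStep (PySem.Dict.empty, PySem.Dict.empty)).1
                (stops.foldl pvCntStep (PySem.Dict.empty, PySem.Dict.empty)).2 cities stop := by
  unfold pvStepA pvStepB
  rw [pv_city_eq stops cities _
    (pv_split0_facts (PySem.Str.replace (PySem.Str.replace stop "(" "") ")" ""))]
  by_cases h : pvCityA stops cities
      (PySem.Str.split₀ (PySem.Str.replace (PySem.Str.replace stop "(" "") ")" "")) = ""
  · rw [if_pos h, if_neg (by simp [h])]
  · rw [if_neg h, if_pos h]

-- ===== VERDICT (by name: the statement is the Claim_ definition above) =====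
theorem extract_cities_spec : Claim_equal_extract_cities := by
  intro stops _
  unfold Spec_extract_cities extract_cities extract_cities_alt
  have h : ∀ (l cities : List String),
      l.foldl (pvStepA stops) cities
        = l.foldl (pvStepB (stops.foldl pvCntStep (PySem.Dict.empty, PySem.Dict.empty)).1
            (stops.foldl pvCntStep (PySem.Dict.empty, PySem.Dict.empty)).2) cities := by
    intro l
    induction l with
    | nil => intro _; simp
    | cons s rest ih => intro cities; rw [List.foldl_cons, List.foldl_cons, pv_step_eq, ih]
  exact h stops []
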